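-- pv_equiv track=rewrite | github.com/bluebluegrass/offertrack | app/utils/llm_client.py | _approx_prompt_size
-- ===== SOURCE A (Python) =====
-- from typing import Any
--
-- def _approx_prompt_size(value: Any) -> int:
--     if value is None:
--         return 0
--     if isinstance(value, str):
--         return len(value)
--     if isinstance(value, list):
--         return sum(_approx_prompt_size(item) for item in value)
--     if isinstance(value, dict):
--         return sum(_approx_prompt_size(v) for v in value.values())
--     return len(str(value))
-- ===== SOURCE B (Python) =====
-- def _approx_prompt_size(value) -> int:
--     # Iterative worklist traversal instead of recursion: same totals, no call stack.
--     total = 0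
--     stack = [value]
--     while stack:
--         item = stack.pop()
--         if item is None:
--             continue
--         elif isinstance(item, str):
--             total += len(item)
--         elif isinstance(item, list):
--             stack.extend(item)
--         elif isinstance(item, dict):
--             stack.extend(item.values())
--         else:
--             total += len(str(item))
--     return total
-- ===== Notes on version B (the rewrite author's own statement) =====
-- stated objective: alternative
-- what changed: Replaced the recursive type-dispatch with an iterative explicit-stack worklist loop that accumulates the total in one pass.
import Mathlib
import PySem

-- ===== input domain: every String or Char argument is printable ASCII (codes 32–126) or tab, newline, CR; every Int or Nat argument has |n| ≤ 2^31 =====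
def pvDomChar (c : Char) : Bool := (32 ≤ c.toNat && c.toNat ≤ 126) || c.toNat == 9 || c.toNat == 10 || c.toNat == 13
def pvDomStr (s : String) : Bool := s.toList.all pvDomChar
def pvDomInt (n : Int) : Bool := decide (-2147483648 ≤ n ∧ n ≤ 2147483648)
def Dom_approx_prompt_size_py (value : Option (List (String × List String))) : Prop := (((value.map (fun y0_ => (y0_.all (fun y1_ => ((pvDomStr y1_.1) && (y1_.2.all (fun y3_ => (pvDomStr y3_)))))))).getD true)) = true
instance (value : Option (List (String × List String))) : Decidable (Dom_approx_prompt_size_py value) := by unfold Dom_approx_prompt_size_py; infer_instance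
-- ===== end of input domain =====

-- B changes the decomposition only: A's recursive type dispatch becomes an explicit-stack worklist loop (alternative, not faster).
-- ===== PORT A =====
-- Recursive dispatch of A, specialised to the input type Option(dict str (list str)):
-- the dict level sums the recursion over .values(); each value is a list, which sums
-- the recursion over its items; each item is a str, contributing len(item).
def approx_prompt_size_py (value : Option (List (String × List String))) : Int :=
  match value with
  | none => 0
  | some d =>
      ((PySem.Dict.ofList d).values).foldl
        (fun acc v => acc + v.foldl (fun a s => a + PySem.Str.len s) 0) 0

-- ===== PORT B =====
-- Worklist items after the initial pop are either lists of strings (dict values) or strings.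
-- Python pops from the END of the stack; the Lean list's head is the stack top, so an
-- extend(xs) becomes pushing xs.reverse on the front.
def pvWeight : (List String ⊕ String) → Nat
  | Sum.inl xs => xs.length + 1
  | Sum.inr _ => 1

def pvLoopB : List (List String ⊕ String) → Int → Int
  | [], total => total
  | (Sum.inl xs) :: rest, total => pvLoopB ((xs.map Sum.inr).reverse ++ rest) total
  | (Sum.inr s) :: rest, total => pvLoopB rest (total + PySem.Str.len s)
termination_by stack _ => (stack.map pvWeight).sum
decreasing_by
  · simp [pvWeight, Function.comp_def]
  · simp [pvWeight]

def approx_prompt_size_py_alt (value : Option (List (String × List String))) : Int :=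
  -- stack = [value]; first iteration pops value: None contributes 0 and the loop ends;
  -- a dict extends the stack with its values (reversed, head = top) and the loop runs.
  match value with
  | none => 0
  | some d => pvLoopB ((((PySem.Dict.ofList d).values).map Sum.inl).reverse) 0

-- ===== PRECONDITION & SPEC =====
def Spec_approx_prompt_size_py (value : Option (List (String × List String))) (out : Int) : Prop := out = approx_prompt_size_py_alt value
instance (value : Option (List (String × List String))) (out : Int) : Decidable (Spec_approx_prompt_size_py value out) := by unfold Spec_approx_prompt_size_py; infer_instance

-- ===== CLAIM (what is proved, stated in full; the proofs are below) =====
def Claim_equal_approx_prompt_size_py : Prop := ∀ (value : Option (List (String × List String))), Dom_approx_prompt_size_py value → Spec_approx_prompt_size_py value (approx_prompt_size_py value)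

-- ===== LEMMAS AND PROOFS =====
theorem pvLoopB_strs (xs : List String) (rest : List (List String ⊕ String)) (total : Int) :
    pvLoopB ((xs.map Sum.inr).reverse ++ rest) total
      = pvLoopB rest (total + (xs.map PySem.Str.len).sum) := by
  induction xs generalizing rest total with
  | nil => simp
  | cons x xs ih =>
      simp only [List.map_cons, List.reverse_cons, List.append_assoc, List.singleton_append]
      rw [ih]
      simp only [pvLoopB, List.sum_cons]
      congr 1
      ring

theorem pvLoopB_lists (vs : List (List String)) (rest : List (List String ⊕ String)) (total : Int) :
    pvLoopB ((vs.map Sum.inl).reverse ++ rest) total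
      = pvLoopB rest (total + (vs.map (fun v => (v.map PySem.Str.len).sum)).sum) := by
  induction vs generalizing rest total with
  | nil => simp
  | cons v vs ih =>
      simp only [List.map_cons, List.reverse_cons, List.append_assoc, List.singleton_append]
      rw [ih]
      simp only [pvLoopB, List.sum_cons]
      rw [pvLoopB_strs]
      congr 1
      ring

-- ===== VERDICT (by name: the statement is the Claim_ definition above) =====
theorem approx_prompt_size_py_spec : Claim_equal_approx_prompt_size_py := by
  intro value _
  cases value with
  | none => rfl
  | some d =>
      unfold Spec_approx_prompt_size_py
      simp only [approx_prompt_size_py, approx_prompt_size_py_alt]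
      have h := pvLoopB_lists ((PySem.Dict.ofList d).values) [] 0
      simp only [List.append_nil] at h
      rw [h]
      simp only [pvLoopB, zero_add, PySem.List.foldl_add]
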